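-- pv_equiv track=rewrite | github.com/UIUC-ChenLab/OpenRTLSet | dataset_flow/Github_flow/Flow_2_New/Filter_and_Edit_postverification.py | iterative_parents_cleanup
-- ===== SOURCE A (Python) =====
-- from typing import Dict, List, Set, Tuple
--
-- def iterative_parents_cleanup(items: Dict[int, dict]) -> Tuple[Dict[int, dict], int, int]:
--     total_removed = 0
--     total_modified = 0
--     while True:
--         existing = set(items.keys())
--         to_remove = []
--         modified = 0
--         for idx, obj in list(items.items()):
--             parents = obj.get("parents") or []
--             if not parents:
--                 continue
--             present = [p for p in parents if p in existing]
--             if not present: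
--                 to_remove.append(idx)
--             elif len(present) != len(parents):
--                 obj["parents"] = present
--                 modified += 1
--         if not to_remove and modified == 0:
--             break
--         for i in to_remove:
--             items.pop(i, None)
--         total_removed += len(to_remove)
--         total_modified += modified
--     return items, total_removed, total_modified
-- ===== SOURCE B (Python) =====
-- def iterative_parents_cleanup(items):
--     # Set-fixpoint reformulation: iterate only the set of surviving keys (with the
--     # previous round's set for the "modified" count); original parent lists are read
--     # once into a side table and the output dict is materialized in a single final
--     # pass.  Return value equals A's; like A, the inner per-node dicts are mutated.
--     parents = {k: (v.get("parents") or []) for k, v in items.items()}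
--     cur = list(items.keys())
--     prev = None
--     total_removed = 0
--     total_modified = 0
--     while True:
--         cset = set(cur)
--         pset = set(prev) if prev is not None else None
--         nxt = [n for n in cur if not parents[n] or any(p in cset for p in parents[n])]
--         removed = len(cur) - len(nxt)
--         modified = sum(1 for n in nxt
--                        if parents[n] and any((pset is None or p in pset) and p not in cset
--                                              for p in parents[n]))
--         if removed == 0 and modified == 0:
--             break
--         total_removed += removed
--         total_modified += modified
--         prev, cur = cur, nxt
--     alive = set(cur)
--     out = {}
--     for k, v in items.items():
--         if k in alive:
--             p = v.get("parents") or []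
--             if p:
--                 v["parents"] = [q for q in p if q in alive]
--             out[k] = v
--     return out, total_removed, total_modified
-- ===== Notes on version B (the rewrite author's own statement) =====
-- stated objective: alternative
-- what changed: B iterates the greatest fixpoint on the set of surviving keys alone (parent lists read once into a side table, per-round removed/modified counts computed from the current and previous key sets) and materializes the trimmed output dict in one final pass, instead of A's rounds that rescan and mutate the whole dict in place.
import Mathlib
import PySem

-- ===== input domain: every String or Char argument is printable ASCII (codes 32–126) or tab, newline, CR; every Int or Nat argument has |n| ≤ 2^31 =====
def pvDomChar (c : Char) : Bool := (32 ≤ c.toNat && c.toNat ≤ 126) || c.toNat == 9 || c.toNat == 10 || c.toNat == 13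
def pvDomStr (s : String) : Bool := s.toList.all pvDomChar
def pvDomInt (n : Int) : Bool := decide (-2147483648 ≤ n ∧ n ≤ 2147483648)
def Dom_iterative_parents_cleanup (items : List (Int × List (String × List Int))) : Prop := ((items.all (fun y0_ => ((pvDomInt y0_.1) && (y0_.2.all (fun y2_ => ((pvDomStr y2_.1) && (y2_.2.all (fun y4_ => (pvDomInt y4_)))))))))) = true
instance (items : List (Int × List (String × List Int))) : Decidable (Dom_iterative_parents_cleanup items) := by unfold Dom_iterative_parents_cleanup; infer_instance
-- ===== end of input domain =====

-- B replaces A's rescan-and-mutate rounds over the whole dict by a fixpoint iteration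
-- on the list of surviving keys alone (the parent lists are read once into a side
-- table), with the removal/modification counts obtained from the current and previous
-- key sets, and the output dict materialized in a single final pass (objective:
-- alternative).  The equivalence proved here is about the RETURN value: Python A
-- mutates its argument in place, B builds a fresh output dict (both mutate the inner
-- per-node dicts).

-- ===== PORT A =====

-- obj.get("parents") or []  (a dict value is read at its first binding)
def pyGetParents (o : List (String × List Int)) : List Int :=
  ((PySem.Dict.mk o).get? "parents").getD []

-- obj["parents"] = v  (overwrite keeps the position of the binding)
def pySetParents (o : List (String × List Int)) (v : List Int) : List (String × List Int) :=
  ((PySem.Dict.mk o).insert "parents" v).items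

-- the `for idx, obj in list(items.items())` scan of one round: returns the items
-- after the in-place obj mutations, the `to_remove` list (in scan order) and `modified`
def aScan (existing : List Int) :
    List (Int × List (String × List Int)) →
    List (Int × List (String × List Int)) × List Int × Int
  | [] => ([], [], 0)
  | (n, o) :: rest =>
    let r := aScan existing rest
    let ps := pyGetParents o
    if ps = [] then ((n, o) :: r.1, r.2.1, r.2.2)
    else
      let present := ps.filter (fun p => existing.contains p)
      if present = [] then ((n, o) :: r.1, n :: r.2.1, r.2.2)
      else if present.length ≠ ps.length then
        ((n, pySetParents o present) :: r.1, r.2.1, r.2.2 + 1)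
      else ((n, o) :: r.1, r.2.1, r.2.2)

-- the `while True` loop; the fuel only bounds the number of rounds (each round that
-- does not break removes an item or shrinks a parents list, so `aFuel` suffices;
-- `existing = set(items.keys())` is used for membership tests only)
def aLoop : Nat → List (Int × List (String × List Int)) → Int → Int →
    List (Int × List (String × List Int)) × Int × Int
  | 0, items, tr, tm => (items, tr, tm)
  | fuel+1, items, tr, tm =>
    let existing := items.map Prod.fst
    let s := aScan existing items
    if s.2.1 = [] ∧ s.2.2 = 0 then (s.1, tr, tm)
    else aLoop fuel ((s.1).filter (fun kv => !(s.2.1.contains kv.1)))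
           (tr + (s.2.1.length : Int)) (tm + s.2.2)

def aFuel (items : List (Int × List (String × List Int))) : Nat :=
  1 + items.length + (items.map (fun kv => (pyGetParents kv.2).length)).sum

def iterative_parents_cleanup (items : List (Int × List (String × List Int))) :
    (List (Int × List (String × List Int))) × Int × Int :=
  aLoop (aFuel items) items 0 0

-- ===== PORT B =====
-- `pset is None or p in pset`
def oMem : Option (List Int) → Int → Bool
  | none, _ => true
  | some pv, p => pv.contains p

-- the final materialization of one surviving entry: trim its parents to `alive`
def trimEntry (alive : List Int) (kv : Int × List (String × List Int)) :
    Int × List (String × List Int) :=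
  if pyGetParents kv.2 = [] then kv
  else (kv.1, pySetParents kv.2 ((pyGetParents kv.2).filter (fun q => alive.contains q)))

-- the `while True` fixpoint loop on (prev, cur); the fuel bounds the rounds as in A
def bLoop : Nat → List (Int × List Int) → Option (List Int) → List Int → Int → Int →
    List Int × Int × Int
  | 0, _, _, cur, tr, tm => (cur, tr, tm)
  | fuel+1, pm, prev, cur, tr, tm =>
    let getP := fun n => ((PySem.Dict.mk pm).get? n).getD []
    let nxt := cur.filter (fun n => (getP n == []) || (getP n).any (fun p => cur.contains p))
    let removed : Int := (cur.length : Int) - (nxt.length : Int)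
    let modified : Int :=
      ((nxt.filter (fun n => !(getP n == []) &&
          (getP n).any (fun p => oMem prev p && !(cur.contains p)))).length : Int)
    if removed = 0 ∧ modified = 0 then (cur, tr, tm)
    else bLoop fuel pm (some cur) nxt (tr + removed) (tm + modified)

def iterative_parents_cleanup_alt (items : List (Int × List (String × List Int))) :
    (List (Int × List (String × List Int))) × Int × Int :=
  let pm := items.map (fun kv => (kv.1, pyGetParents kv.2))
  let r := bLoop (1 + items.length + (items.map (fun kv => (pyGetParents kv.2).length)).sum)
             pm none (items.map Prod.fst) 0 0
  ((items.filter (fun kv => r.1.contains kv.1)).map (trimEntry r.1), r.2.1, r.2.2)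

-- ===== PRECONDITION & SPEC =====
-- Pre_ excludes association lists whose outer key list or some inner key list has a
-- duplicate: such lists cannot arise from the Python function's dict arguments (a
-- Python dict has unique keys), so their list-encoding behaviour is accidental.
def Pre_iterative_parents_cleanup (items : List (Int × List (String × List Int))) : Prop :=
  (items.map Prod.fst).Nodup ∧ ∀ kv ∈ items, (kv.2.map Prod.fst).Nodup

instance (items : List (Int × List (String × List Int))) :
    Decidable (Pre_iterative_parents_cleanup items) := by
  unfold Pre_iterative_parents_cleanup; infer_instance

def pvWitness_iterative_parents_cleanup : (List (Int × List (String × List Int))) :=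
  [(1, [("parents", [2])]), (2, [])]

def Spec_iterative_parents_cleanup (items : List (Int × List (String × List Int))) (out : (List (Int × List (String × List Int))) × Int × Int) : Prop := out = iterative_parents_cleanup_alt items
instance (items : List (Int × List (String × List Int))) (out : (List (Int × List (String × List Int))) × Int × Int) : Decidable (Spec_iterative_parents_cleanup items out) := by unfold Spec_iterative_parents_cleanup; infer_instance

-- ===== CLAIM (what is proved, stated in full; the proofs are below) =====
def Claim_equal_iterative_parents_cleanup : Prop := ∀ (items : List (Int × List (String × List Int))), Dom_iterative_parents_cleanup items → Pre_iterative_parents_cleanup items → Spec_iterative_parents_cleanup items (iterative_parents_cleanup items)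

-- ===== LEMMAS AND PROOFS =====

def pvP (kv : Int × List (String × List Int)) : List Int := pyGetParents kv.2

def pvTrimO : Option (List Int) → (Int × List (String × List Int)) →
    Int × List (String × List Int)
  | none, kv => kv
  | some pv, kv => trimEntry pv kv

def pvBuild (l : List (Int × List (String × List Int))) (pr : Option (List Int))
    (cur : List Int) : List (Int × List (String × List Int)) :=
  (l.filter (fun kv => cur.contains kv.1)).map (pvTrimO pr)

def pvSurvb (cur : List Int) (kv : Int × List (String × List Int)) : Bool :=
  (pvP kv == []) || (pvP kv).any (fun p => cur.contains p)

def pvDieb (cur : List Int) (kv : Int × List (String × List Int)) : Bool :=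
  !(pvP kv == []) && !((pvP kv).any (fun p => cur.contains p))

def pvShrinkb (pr : Option (List Int)) (cur : List Int)
    (kv : Int × List (String × List Int)) : Bool :=
  (pvP kv).any (fun p => oMem pr p && !(cur.contains p))

def pvPm (l : List (Int × List (String × List Int))) : List (Int × List Int) :=
  l.map (fun kv => (kv.1, pyGetParents kv.2))

def pvMeasure (l : List (Int × List (String × List Int))) (pr : Option (List Int))
    (cur : List Int) : Nat :=
  (l.filter (fun kv => cur.contains kv.1)).length +
    ((l.filter (fun kv => cur.contains kv.1)).map
      (fun kv => ((pvP kv).filter (fun p => oMem pr p)).length)).sum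

theorem pvMkItems {κ ν : Type} (d : PySem.Dict κ ν) : PySem.Dict.mk d.items = d := rfl

theorem pvGetSet (o : List (String × List Int)) (v : List Int) :
    pyGetParents (pySetParents o v) = v := by
  unfold pyGetParents pySetParents
  rw [pvMkItems, PySem.Dict.get?_insert_self]; rfl

theorem pvSetSet (o : List (String × List Int)) (a b : List Int) :
    pySetParents (pySetParents o a) b = pySetParents o b := by
  unfold pySetParents
  rw [pvMkItems, PySem.Dict.insert_insert_self]

theorem pvSetSelf (o : List (String × List Int)) (ps : List Int)
    (hnd : (o.map Prod.fst).Nodup) (h : (PySem.Dict.mk o).get? "parents" = some ps) :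
    pySetParents o ps = o := by
  have hc : (PySem.Dict.mk o).contains "parents" = true := by
    rw [PySem.Dict.contains_eq_isSome_get?, h]; rfl
  have hmem : ("parents", ps) ∈ o :=
    PySem.Dict.mem_items_of_get?_eq_some (d := PySem.Dict.mk o) h
  unfold pySetParents
  rw [PySem.Dict.items_insert_of_contains _ _ hc]
  apply (List.map_congr_left ?_).trans (List.map_id _)
  intro p hp
  by_cases hpk : p.1 = "parents"
  · have hpe : p = ("parents", ps) :=
      List.inj_on_of_nodup_map hnd hp hmem hpk
    simp [hpe]
  · simp [hpk]

theorem pvTrimO_fst (pr : Option (List Int)) (kv : Int × List (String × List Int)) :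
    (pvTrimO pr kv).1 = kv.1 := by
  cases pr with
  | none => rfl
  | some pv =>
    simp only [pvTrimO, trimEntry]
    split <;> rfl

theorem pvP_trimO (pr : Option (List Int)) (kv : Int × List (String × List Int)) :
    pyGetParents (pvTrimO pr kv).2 = (pvP kv).filter (fun p => oMem pr p) := by
  cases pr with
  | none => simp [pvTrimO, oMem, pvP, List.filter_true]
  | some pv =>
    simp only [pvTrimO, trimEntry, oMem]
    split
    · rename_i h
      simp [pvP, h]
    · rw [pvGetSet]; rfl

theorem pvKeys_build (l : List (Int × List (String × List Int))) (pr : Option (List Int))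
    (cur : List Int) :
    (pvBuild l pr cur).map Prod.fst = (l.map Prod.fst).filter (fun n => cur.contains n) := by
  unfold pvBuild
  rw [List.filter_map]
  rw [List.map_map]
  congr 1
  funext kv
  exact pvTrimO_fst pr kv

theorem pvFst_inj (l : List (Int × List (String × List Int)))
    (hk : (l.map Prod.fst).Nodup) (kv kv' : Int × List (String × List Int))
    (h : kv ∈ l) (h' : kv' ∈ l) (he : kv.1 = kv'.1) : kv = kv' :=
  List.inj_on_of_nodup_map hk h h' he

theorem pvPm_lookup (l : List (Int × List (String × List Int)))
    (hk : (l.map Prod.fst).Nodup) (kv : Int × List (String × List Int)) (hm : kv ∈ l) :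
    (PySem.Dict.mk (pvPm l)).get? kv.1 = some (pvP kv) := by
  have hnd : ((pvPm l).map Prod.fst).Nodup := by
    unfold pvPm
    rw [List.map_map]
    exact hk
  apply PySem.Dict.get?_of_mem_items (d := PySem.Dict.mk (pvPm l)) ?_ hnd
  unfold pvPm
  exact List.mem_map_of_mem hm

theorem pvFilterSplit (l : List (Int × List (String × List Int)))
    (a b : (Int × List (String × List Int)) → Bool) :
    (l.filter a).length
      = (l.filter (fun kv => a kv && b kv)).length
        + (l.filter (fun kv => a kv && !(b kv))).length := by
  induction l with
  | nil => rfl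
  | cons x xs ih =>
    by_cases ha : a x = true
    · by_cases hb : b x = true
      · simp [List.filter_cons, ha, hb, ih]; omega
      · simp only [Bool.not_eq_true] at hb
        simp [List.filter_cons, ha, hb, ih]; omega
    · simp only [Bool.not_eq_true] at ha
      simp [List.filter_cons, ha, ih]

theorem pvLenFilterMono {α : Type} (L : List α) (p q : α → Bool)
    (h : ∀ x ∈ L, p x = true → q x = true) :
    (L.filter p).length ≤ (L.filter q).length := by
  induction L with
  | nil => simp
  | cons x xs ih =>
    have ih' := ih (fun y hy => h y (List.mem_cons_of_mem _ hy))
    by_cases hp : p x = true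
    · simp [List.filter_cons, hp, h x (List.mem_cons_self) hp]; omega
    · simp only [Bool.not_eq_true] at hp
      simp only [List.filter_cons, hp]
      simp only [Bool.false_eq_true, if_false]
      split
      · simp; omega
      · exact ih'

theorem pvSumLt (L : List (Int × List (String × List Int)))
    (f g : (Int × List (String × List Int)) → Nat)
    (hle : ∀ x ∈ L, f x ≤ g x) (hex : ∃ x ∈ L, f x < g x) :
    (L.map f).sum < (L.map g).sum := by
  induction L with
  | nil => simp at hex
  | cons x xs ih =>
    obtain ⟨y, hy, hlt⟩ := hex
    have hle' : ∀ z ∈ xs, f z ≤ g z := fun z hz => hle z (List.mem_cons_of_mem _ hz)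
    rcases List.mem_cons.mp hy with rfl | hy'
    · have : (xs.map f).sum ≤ (xs.map g).sum := List.sum_le_sum hle'
      simp only [List.map_cons, List.sum_cons]
      omega
    · have := ih hle' ⟨y, hy', hlt⟩
      have hx := hle x List.mem_cons_self
      simp only [List.map_cons, List.sum_cons]
      omega

theorem pvAny_iff (l : List Int) (p : Int → Bool) : l.any p = true ↔ l.filter p ≠ [] := by
  rw [List.any_eq_true, Ne, List.filter_eq_nil_iff]
  push_neg
  simp

theorem pvScan_crux (pr : Option (List Int)) (cur : List Int)
    (hsub : ∀ p : Int, cur.contains p = true → oMem pr p = true) :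
    ∀ l : List (Int × List (String × List Int)),
    (∀ kv ∈ l, (kv.2.map Prod.fst).Nodup) →
    (∀ kv ∈ l, cur.contains kv.1 = true → pvP kv ≠ [] →
        (pvP kv).filter (fun p => oMem pr p) ≠ []) →
    aScan cur (pvBuild l pr cur) =
      ((l.filter (fun kv => cur.contains kv.1)).map
          (fun kv => if pvSurvb cur kv then trimEntry cur kv else pvTrimO pr kv),
       (l.filter (fun kv => cur.contains kv.1 && pvDieb cur kv)).map Prod.fst,
       ((l.filter (fun kv => cur.contains kv.1 && pvSurvb cur kv && pvShrinkb pr cur kv)).length : Int)) := by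
  intro l
  induction l with
  | nil => intro _ _; rfl
  | cons kv rest ih =>
    intro hin halive
    have hinr : ∀ kv' ∈ rest, (kv'.2.map Prod.fst).Nodup :=
      fun kv' h => hin kv' (List.mem_cons_of_mem _ h)
    have halr : ∀ kv' ∈ rest, cur.contains kv'.1 = true → pvP kv' ≠ [] →
        (pvP kv').filter (fun p => oMem pr p) ≠ [] :=
      fun kv' h => halive kv' (List.mem_cons_of_mem _ h)
    have IH := ih hinr halr
    by_cases hc : cur.contains kv.1 = true
    · -- entry is alive this round
      have hcm : kv.1 ∈ cur := by simpa using hc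
      have hbuild : pvBuild (kv :: rest) pr cur = pvTrimO pr kv :: pvBuild rest pr cur := by
        unfold pvBuild
        rw [List.filter_cons]
        simp [hcm]
      rw [hbuild]
      have hscan : aScan cur (pvTrimO pr kv :: pvBuild rest pr cur) =
          (let r := aScan cur (pvBuild rest pr cur)
           let ps := pyGetParents (pvTrimO pr kv).2
           if ps = [] then ((pvTrimO pr kv) :: r.1, r.2.1, r.2.2)
           else
             let present := ps.filter (fun p => cur.contains p)
             if present = [] then ((pvTrimO pr kv) :: r.1, (pvTrimO pr kv).1 :: r.2.1, r.2.2)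
             else if present.length ≠ ps.length then
               (((pvTrimO pr kv).1, pySetParents (pvTrimO pr kv).2 present) :: r.1, r.2.1, r.2.2 + 1)
             else ((pvTrimO pr kv) :: r.1, r.2.1, r.2.2)) := by
        conv_lhs => rw [show pvTrimO pr kv = ((pvTrimO pr kv).1, (pvTrimO pr kv).2) from rfl]
        rfl
      rw [hscan, IH]
      simp only [pvP_trimO]
      by_cases hP : pvP kv = []
      · -- no parents: skipped
        have hP' : pyGetParents kv.2 = [] := hP
        have h1 : (pvP kv).filter (fun p => oMem pr p) = [] := by rw [hP]; rfl
        have hsurv : pvSurvb cur kv = true := by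
          unfold pvSurvb; rw [hP]; rfl
        have hdie : pvDieb cur kv = false := by
          unfold pvDieb; rw [hP]; rfl
        have hshr : pvShrinkb pr cur kv = false := by
          unfold pvShrinkb; rw [hP]; rfl
        have htk : trimEntry cur kv = kv := by
          unfold trimEntry; rw [if_pos hP']
        have htr : pvTrimO pr kv = kv := by
          cases pr with
          | none => rfl
          | some pv => show trimEntry pv kv = kv; unfold trimEntry; rw [if_pos hP']
        rw [if_pos h1]
        refine congrArg₂ Prod.mk ?_ (congrArg₂ Prod.mk ?_ ?_)
        · rw [List.filter_cons, if_pos hc]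
          rw [List.map_cons, if_pos hsurv, htk, htr]
        · rw [List.filter_cons,
            if_neg (show ¬ (cur.contains kv.1 && pvDieb cur kv) = true by rw [hc, hdie]; simp)]
        · rw [List.filter_cons,
            if_neg (show ¬ (cur.contains kv.1 && pvSurvb cur kv && pvShrinkb pr cur kv) = true by
              rw [hc, hsurv, hshr]; simp)]
      · -- parents nonempty
        have hP' : ¬ (pyGetParents kv.2 = []) := hP
        have hps' : (pvP kv).filter (fun p => oMem pr p) ≠ [] :=
          halive kv List.mem_cons_self hc hP
        rw [if_neg hps']
        have hpres : ((pvP kv).filter (fun p => oMem pr p)).filter (fun p => cur.contains p)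
            = (pvP kv).filter (fun p => cur.contains p) := by
          rw [List.filter_filter]
          apply List.filter_congr
          intro p _
          by_cases hcp : cur.contains p = true
          · simp [hcp, hsub p hcp]
          · have hnp : p ∉ cur := by simpa using hcp
            simp [hcp, hnp]
        rw [hpres]
        by_cases hdead : (pvP kv).filter (fun p => cur.contains p) = []
        · -- removed
          have hany : ((pvP kv).any fun p => cur.contains p) = false := by
            cases hq : ((pvP kv).any fun p => cur.contains p) with
            | false => rfl
            | true => exact absurd hdead ((pvAny_iff _ _).mp hq)
          have hbeq : (pvP kv == []) = false := by simpa using hP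
          have hsurv : pvSurvb cur kv = false := by
            unfold pvSurvb; rw [hbeq, hany]; rfl
          have hdie : pvDieb cur kv = true := by
            unfold pvDieb; rw [hbeq, hany]; rfl
          rw [if_pos hdead]
          refine congrArg₂ Prod.mk ?_ (congrArg₂ Prod.mk ?_ ?_)
          · rw [List.filter_cons, if_pos hc]
            rw [List.map_cons, if_neg (by simp [hsurv])]
          · rw [List.filter_cons,
              if_pos (show (cur.contains kv.1 && pvDieb cur kv) = true by rw [hc, hdie]; rfl)]
            rw [List.map_cons, pvTrimO_fst]
          · rw [List.filter_cons,
              if_neg (show ¬ (cur.contains kv.1 && pvSurvb cur kv && pvShrinkb pr cur kv) = true by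
                rw [hc, hsurv]; simp)]
        · -- survives
          rw [if_neg hdead]
          have hany : ((pvP kv).any fun p => cur.contains p) = true := by
            rw [pvAny_iff]; exact hdead
          have hsurv : pvSurvb cur kv = true := by
            unfold pvSurvb; rw [hany]; simp
          have hdie : pvDieb cur kv = false := by
            unfold pvDieb; rw [hany]; simp
          have hshr_iff :
              ((pvP kv).filter (fun p => cur.contains p)).length ≠
                  ((pvP kv).filter (fun p => oMem pr p)).length ↔
                pvShrinkb pr cur kv = true := by
            unfold pvShrinkb
            rw [← List.any_filter, ← hpres, Ne, List.length_filter_eq_length_iff,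
              List.any_eq_true]
            constructor
            · intro h
              by_contra hno
              apply h
              intro a ha
              by_contra hna
              exact hno ⟨a, ha, by simpa using hna⟩
            · rintro ⟨a, ha, hna⟩ hall
              have h3 : a ∈ cur := by simpa using hall a ha
              simp [h3] at hna
          by_cases hshr : pvShrinkb pr cur kv = true
          · -- modified
            rw [if_pos (hshr_iff.mpr hshr)]
            have hhead : ((pvTrimO pr kv).1,
                pySetParents (pvTrimO pr kv).2 ((pvP kv).filter (fun p => cur.contains p)))
                = trimEntry cur kv := by
              unfold trimEntry
              rw [if_neg hP']
              refine congrArg₂ Prod.mk (pvTrimO_fst pr kv) ?_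
              cases pr with
              | none => rfl
              | some pv =>
                show pySetParents (trimEntry pv kv).2 _ = _
                unfold trimEntry
                rw [if_neg hP']
                exact pvSetSet _ _ _
            refine congrArg₂ Prod.mk ?_ (congrArg₂ Prod.mk ?_ ?_)
            · rw [List.filter_cons, if_pos hc]
              rw [List.map_cons, if_pos hsurv, hhead]
            · rw [List.filter_cons,
                if_neg (show ¬ (cur.contains kv.1 && pvDieb cur kv) = true by
                  rw [hc, hdie]; simp)]
            · rw [List.filter_cons,
                if_pos (show (cur.contains kv.1 && pvSurvb cur kv && pvShrinkb pr cur kv) = true by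
                  rw [hc, hsurv, hshr]; rfl)]
              rw [List.length_cons]
              push_cast
              ring
          · -- unchanged
            rw [if_neg (fun h => hshr (hshr_iff.mp h))]
            have hall : ∀ a ∈ (pvP kv).filter (fun p => oMem pr p), cur.contains a = true := by
              by_contra hno
              apply hshr
              rw [← hshr_iff, ← hpres, Ne, List.length_filter_eq_length_iff]
              exact hno
            have hfe : (pvP kv).filter (fun p => cur.contains p) =
                (pvP kv).filter (fun p => oMem pr p) := by
              rw [← hpres]
              exact List.filter_eq_self.mpr hall
            have hobj2 : pvTrimO pr kv = trimEntry cur kv := by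
              cases pr with
              | none =>
                show kv = trimEntry cur kv
                have hflt : (pyGetParents kv.2).filter (fun q => cur.contains q)
                    = pyGetParents kv.2 := by
                  have h0 : (pvP kv).filter (fun p => cur.contains p) = pvP kv := by
                    rw [hfe]
                    simp [oMem]
                  exact h0
                unfold trimEntry
                rw [if_neg hP', hflt]
                have hget : (PySem.Dict.mk kv.2).get? "parents" = some (pyGetParents kv.2) := by
                  cases hg : (PySem.Dict.mk kv.2).get? "parents" with
                  | none => exfalso; apply hP'; unfold pyGetParents; rw [hg]; rfl
                  | some v => unfold pyGetParents; rw [hg]; rfl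
                rw [pvSetSelf kv.2 (pyGetParents kv.2) (hin kv List.mem_cons_self) hget]
              | some pv =>
                show trimEntry pv kv = trimEntry cur kv
                unfold trimEntry
                rw [if_neg hP', if_neg hP']
                have hfe' : (pyGetParents kv.2).filter (fun q => pv.contains q)
                    = (pyGetParents kv.2).filter (fun q => cur.contains q) := by
                  have := hfe.symm
                  simpa [oMem] using this
                rw [hfe']
            have hshrf : pvShrinkb pr cur kv = false := by
              cases hq : pvShrinkb pr cur kv with
              | false => rfl
              | true => exact absurd hq hshr
            refine congrArg₂ Prod.mk ?_ (congrArg₂ Prod.mk ?_ ?_)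
            · rw [List.filter_cons, if_pos hc]
              rw [List.map_cons, if_pos hsurv, hobj2]
            · rw [List.filter_cons,
                if_neg (show ¬ (cur.contains kv.1 && pvDieb cur kv) = true by
                  rw [hc, hdie]; simp)]
            · rw [List.filter_cons,
                if_neg (show ¬ (cur.contains kv.1 && pvSurvb cur kv && pvShrinkb pr cur kv) = true by
                  rw [hc, hsurv, hshrf]; simp)]
    · -- entry not alive: filtered away everywhere
      simp only [Bool.not_eq_true] at hc
      have hnm : kv.1 ∉ cur := by simpa using hc
      have hbuild : pvBuild (kv :: rest) pr cur = pvBuild rest pr cur := by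
        unfold pvBuild
        rw [List.filter_cons]
        simp [hnm]
      rw [hbuild, IH]
      refine congrArg₂ Prod.mk ?_ (congrArg₂ Prod.mk ?_ ?_)
      · rw [List.filter_cons, if_neg (by rw [hc]; simp)]
      · rw [List.filter_cons, if_neg (by rw [hc]; simp)]
      · rw [List.filter_cons, if_neg (by rw [hc]; simp)]

theorem pvTrim_fst (a : List Int) (kv : Int × List (String × List Int)) :
    (trimEntry a kv).1 = kv.1 := by
  unfold trimEntry; split <;> rfl

theorem pvTrimO_some (pv : List Int) : pvTrimO (some pv) = trimEntry pv := rfl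

theorem pvDieNotSurv (cur : List Int) (kv : Int × List (String × List Int)) :
    pvDieb cur kv = !pvSurvb cur kv := by
  unfold pvDieb pvSurvb; rw [Bool.not_or]

theorem pvMapFst_contains (l : List (Int × List (String × List Int)))
    (hk : (l.map Prod.fst).Nodup) (b : (Int × List (String × List Int)) → Bool)
    (kv : Int × List (String × List Int)) (hm : kv ∈ l) :
    ((l.filter b).map Prod.fst).contains kv.1 = b kv := by
  cases hb : b kv with
  | true =>
    have h1 : kv ∈ l.filter b := List.mem_filter.mpr ⟨hm, hb⟩
    have h2 : kv.1 ∈ (l.filter b).map Prod.fst := List.mem_map_of_mem h1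
    simpa using h2
  | false =>
    by_contra hcontra
    have h3 : kv.1 ∈ (l.filter b).map Prod.fst := by
      cases hq : ((l.filter b).map Prod.fst).contains kv.1 with
      | true => simpa using hq
      | false => exact absurd hq hcontra
    obtain ⟨kv', hkv', hfst⟩ := List.mem_map.mp h3
    have hkl : kv' ∈ l := List.mem_of_mem_filter hkv'
    have hbt : b kv' = true := List.of_mem_filter hkv'
    have : kv' = kv := pvFst_inj l hk kv' kv hkl hm hfst
    rw [this] at hbt
    rw [hbt] at hb
    exact Bool.true_eq_false.mp hb

theorem pvPopAux (pr : Option (List Int)) (cur : List Int) (rem : List Int) :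
    ∀ l : List (Int × List (String × List Int)),
    (∀ kv ∈ l, rem.contains kv.1 = (cur.contains kv.1 && pvDieb cur kv)) →
    ((l.filter (fun kv => cur.contains kv.1)).map
        (fun kv => if pvSurvb cur kv then trimEntry cur kv else pvTrimO pr kv)).filter
      (fun kv => !(rem.contains kv.1))
      = (l.filter (fun kv => cur.contains kv.1 && pvSurvb cur kv)).map (trimEntry cur) := by
  intro l
  induction l with
  | nil => intro _; rfl
  | cons kv rest ih =>
    intro hchar
    have ihr := ih (fun kv' h => hchar kv' (List.mem_cons_of_mem _ h))
    have hckv := hchar kv List.mem_cons_self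
    by_cases hc : cur.contains kv.1 = true
    · have lhs1 : (kv :: rest).filter (fun kv => cur.contains kv.1)
          = kv :: rest.filter (fun kv => cur.contains kv.1) := by
        rw [List.filter_cons, if_pos hc]
      rw [lhs1, List.map_cons]
      by_cases hs : pvSurvb cur kv = true
      · have hd : pvDieb cur kv = false := by rw [pvDieNotSurv, hs]; rfl
        rw [if_pos hs]
        rw [List.filter_cons]
        rw [if_pos (show (!(rem.contains (trimEntry cur kv).1)) = true by
          rw [pvTrim_fst, hckv, hc, hd]; rfl)]
        rw [List.filter_cons, if_pos (show (cur.contains kv.1 && pvSurvb cur kv) = true by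
          rw [hc, hs]; rfl)]
        rw [List.map_cons, ihr]
      · have hsf : pvSurvb cur kv = false := by
          cases h : pvSurvb cur kv with
          | true => exact absurd h hs
          | false => rfl
        have hd : pvDieb cur kv = true := by rw [pvDieNotSurv, hsf]; rfl
        rw [if_neg hs]
        rw [List.filter_cons]
        rw [if_neg (show ¬ (!(rem.contains (pvTrimO pr kv).1)) = true by
          rw [pvTrimO_fst, hckv, hc, hd]; simp)]
        rw [List.filter_cons, if_neg (show ¬ (cur.contains kv.1 && pvSurvb cur kv) = true by
          rw [hc, hsf]; simp)]
        exact ihr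
    · have hcf : cur.contains kv.1 = false := by
        cases h : cur.contains kv.1 with
        | true => exact absurd h hc
        | false => rfl
      rw [List.filter_cons, if_neg (by rw [hcf]; simp)]
      rw [List.filter_cons, if_neg (by rw [hcf]; simp)]
      exact ihr

-- B's per-round quantities, in terms of the original list

theorem pvNxt_eq (l : List (Int × List (String × List Int))) (cur : List Int)
    (hk : (l.map Prod.fst).Nodup)
    (f1 : (l.map Prod.fst).filter (fun n => cur.contains n) = cur) :
    cur.filter (fun n =>
        ((((PySem.Dict.mk (pvPm l)).get? n).getD []) == []) ||
          (((PySem.Dict.mk (pvPm l)).get? n).getD []).any (fun p => cur.contains p))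
      = (l.filter (fun kv => cur.contains kv.1 && pvSurvb cur kv)).map Prod.fst := by
  have h0 : cur.filter (fun n =>
        ((((PySem.Dict.mk (pvPm l)).get? n).getD []) == []) ||
          (((PySem.Dict.mk (pvPm l)).get? n).getD []).any (fun p => cur.contains p))
      = ((l.map Prod.fst).filter (fun n => cur.contains n)).filter (fun n =>
        ((((PySem.Dict.mk (pvPm l)).get? n).getD []) == []) ||
          (((PySem.Dict.mk (pvPm l)).get? n).getD []).any (fun p => cur.contains p)) := by
    rw [f1]
  rw [h0, List.filter_filter, List.filter_map]
  congr 1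
  apply List.filter_congr
  intro kv hm
  have hpm := pvPm_lookup l hk kv hm
  simp only [Function.comp_apply]
  rw [hpm]
  show ((((some (pvP kv)).getD [] == []) ||
          ((some (pvP kv)).getD []).any (fun p => cur.contains p)) && cur.contains kv.1)
      = (cur.contains kv.1 && pvSurvb cur kv)
  unfold pvSurvb
  rw [Option.getD_some]
  exact Bool.and_comm _ _

theorem pvModFilter_eq (l : List (Int × List (String × List Int)))
    (pr : Option (List Int)) (cur : List Int)
    (hk : (l.map Prod.fst).Nodup) :
    ((l.filter (fun kv => cur.contains kv.1 && pvSurvb cur kv)).map Prod.fst).filter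
        (fun n => !((((PySem.Dict.mk (pvPm l)).get? n).getD []) == []) &&
          (((PySem.Dict.mk (pvPm l)).get? n).getD []).any
            (fun p => oMem pr p && !(cur.contains p)))
      = ((l.filter (fun kv =>
          cur.contains kv.1 && pvSurvb cur kv && pvShrinkb pr cur kv)).map Prod.fst) := by
  rw [List.filter_map, List.filter_filter]
  congr 1
  apply List.filter_congr
  intro kv hm
  have hpm := pvPm_lookup l hk kv hm
  simp only [Function.comp]
  rw [hpm]
  show ((!(pvP kv == []) && (pvP kv).any fun p => oMem pr p && !cur.contains p) &&
      (cur.contains kv.1 && pvSurvb cur kv))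
    = (cur.contains kv.1 && pvSurvb cur kv && pvShrinkb pr cur kv)
  unfold pvSurvb pvShrinkb
  cases hP : pvP kv == [] with
  | true =>
    have hnil : pvP kv = [] := eq_of_beq hP
    rw [hnil]
    cases h1 : cur.contains kv.1 <;> rfl
  | false =>
    cases h1 : cur.contains kv.1 <;>
      cases h2 : (pvP kv).any (fun p => cur.contains p) <;>
        cases h3 : (pvP kv).any (fun p => oMem pr p && !cur.contains p) <;> rfl

theorem pvFilterAnd {α : Type} (l : List α) (a b : α → Bool) :
    l.filter (fun x => a x && b x) = (l.filter a).filter b := by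
  rw [List.filter_filter]
  apply List.filter_congr
  intro x _
  rw [Bool.and_comm]

theorem pvLenFilterStrict {α : Type} (L : List α) (p q : α → Bool)
    (himp : ∀ x ∈ L, q x = true → p x = true) (x : α) (hx : x ∈ L)
    (hq : q x = false) (hp : p x = true) :
    (L.filter q).length < (L.filter p).length := by
  induction L with
  | nil => cases hx
  | cons y ys ih =>
    have himp' : ∀ z ∈ ys, q z = true → p z = true :=
      fun z hz => himp z (List.mem_cons_of_mem _ hz)
    have hmono := pvLenFilterMono ys q p himp'
    rcases List.mem_cons.mp hx with rfl | hx'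
    · rw [List.filter_cons, List.filter_cons, if_neg (by rw [hq]; simp), if_pos hp]
      simp only [List.length_cons]
      omega
    · have hlt := ih (fun z hz => himp z (List.mem_cons_of_mem _ hz)) hx'
      rw [List.filter_cons, List.filter_cons]
      by_cases hqy : q y = true
      · rw [if_pos hqy, if_pos (himp y List.mem_cons_self hqy)]
        simp only [List.length_cons]
        omega
      · rw [if_neg hqy]
        by_cases hpy : p y = true
        · rw [if_pos hpy]
          simp only [List.length_cons]
          omega
        · rw [if_neg hpy]
          omega

theorem pvCurLen (l : List (Int × List (String × List Int))) (cur : List Int)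
    (f1 : (l.map Prod.fst).filter (fun n => cur.contains n) = cur) :
    cur.length = (l.filter (fun kv => cur.contains kv.1)).length := by
  conv_lhs => rw [← f1]
  rw [List.filter_map, List.length_map]
  congr 1

theorem pvSplitLen (l : List (Int × List (String × List Int))) (cur : List Int) :
    (l.filter (fun kv => cur.contains kv.1)).length
      = (l.filter (fun kv => cur.contains kv.1 && pvSurvb cur kv)).length
        + (l.filter (fun kv => cur.contains kv.1 && pvDieb cur kv)).length := by
  rw [pvFilterSplit l (fun kv => cur.contains kv.1) (fun kv => pvSurvb cur kv)]
  congr 2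
  apply List.filter_congr
  intro kv _
  rw [pvDieNotSurv]

theorem pvMeasDec (l : List (Int × List (String × List Int))) (pr : Option (List Int))
    (cur : List Int) (hk : (l.map Prod.fst).Nodup)
    (hsub : ∀ p : Int, cur.contains p = true → oMem pr p = true)
    (hnd : ¬((l.filter (fun kv => cur.contains kv.1 && pvDieb cur kv)) = [] ∧
        (l.filter (fun kv => cur.contains kv.1 && pvSurvb cur kv && pvShrinkb pr cur kv)) = [])) :
    pvMeasure l (some cur)
        ((l.filter (fun kv => cur.contains kv.1 && pvSurvb cur kv)).map Prod.fst)
      < pvMeasure l pr cur := by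
  unfold pvMeasure
  have hfnx : l.filter (fun kv =>
      (((l.filter (fun kv => cur.contains kv.1 && pvSurvb cur kv)).map Prod.fst)).contains kv.1)
      = l.filter (fun kv => cur.contains kv.1 && pvSurvb cur kv) :=
    List.filter_congr (fun kv hm => pvMapFst_contains l hk _ kv hm)
  rw [hfnx]
  have hpoint : ∀ kv ∈ l,
      ((pvP kv).filter (fun p => oMem (some cur) p)).length
        ≤ ((pvP kv).filter (fun p => oMem pr p)).length :=
    fun kv _ => pvLenFilterMono (pvP kv) _ _ (fun p _ h => hsub p h)
  have hsubl : List.Sublist (l.filter (fun kv => cur.contains kv.1 && pvSurvb cur kv))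
      (l.filter (fun kv => cur.contains kv.1)) := by
    rw [pvFilterAnd]
    exact List.filter_sublist
  have hsplit := pvSplitLen l cur
  by_cases hLd : (l.filter (fun kv => cur.contains kv.1 && pvDieb cur kv)) = []
  · -- no removals, but some modification
    have hLm : (l.filter (fun kv =>
        cur.contains kv.1 && pvSurvb cur kv && pvShrinkb pr cur kv)) ≠ [] := by
      intro h
      exact hnd ⟨hLd, h⟩
    have hLs : l.filter (fun kv => cur.contains kv.1 && pvSurvb cur kv)
        = l.filter (fun kv => cur.contains kv.1) := by
      apply List.filter_congr
      intro kv hm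
      cases hc : cur.contains kv.1 with
      | false => rfl
      | true =>
        cases hs : pvSurvb cur kv with
        | true => rfl
        | false =>
          exfalso
          have hd : pvDieb cur kv = true := by rw [pvDieNotSurv, hs]; rfl
          have : kv ∈ l.filter (fun kv => cur.contains kv.1 && pvDieb cur kv) :=
            List.mem_filter.mpr ⟨hm, by rw [hc, hd]; rfl⟩
          rw [hLd] at this
          exact absurd this (List.not_mem_nil)
    rw [hLs]
    have hwit : ∃ kv ∈ l.filter (fun kv => cur.contains kv.1),
        ((pvP kv).filter (fun p => oMem (some cur) p)).length
          < ((pvP kv).filter (fun p => oMem pr p)).length := by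
      obtain ⟨kv, hkv⟩ := List.exists_mem_of_ne_nil _ hLm
      have hml : kv ∈ l := List.mem_of_mem_filter hkv
      have hflags := List.of_mem_filter hkv
      have hc : cur.contains kv.1 = true := by
        cases h : cur.contains kv.1 with
        | true => rfl
        | false => rw [h] at hflags; exact absurd hflags (by simp)
      have hshr : pvShrinkb pr cur kv = true := by
        cases h : pvShrinkb pr cur kv with
        | true => rfl
        | false => rw [h] at hflags; simp at hflags
      refine ⟨kv, List.mem_filter.mpr ⟨hml, hc⟩, ?_⟩
      unfold pvShrinkb at hshr
      obtain ⟨p, hp, hpp⟩ := List.any_eq_true.mp hshr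
      have hpo : oMem pr p = true := by
        cases h : oMem pr p with
        | true => rfl
        | false => rw [h] at hpp; simp at hpp
      have hpc : oMem (some cur) p = false := by
        show cur.contains p = false
        cases h : cur.contains p with
        | false => rfl
        | true => rw [h] at hpp; simp at hpp
      exact pvLenFilterStrict (pvP kv) (fun q => oMem pr q) (fun q => oMem (some cur) q)
        (fun x _ h => hsub x h) p hp hpc hpo
    have := pvSumLt (l.filter (fun kv => cur.contains kv.1))
      (fun kv => ((pvP kv).filter (fun p => oMem (some cur) p)).length)
      (fun kv => ((pvP kv).filter (fun p => oMem pr p)).length)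
      (fun kv hm => hpoint kv (List.mem_of_mem_filter hm)) hwit
    omega
  · -- at least one removal
    have h1 : 0 < (l.filter (fun kv => cur.contains kv.1 && pvDieb cur kv)).length :=
      List.length_pos_of_ne_nil hLd
    have h2 : ((l.filter (fun kv => cur.contains kv.1 && pvSurvb cur kv)).map
        (fun kv => ((pvP kv).filter (fun p => oMem (some cur) p)).length)).sum
        ≤ ((l.filter (fun kv => cur.contains kv.1)).map
        (fun kv => ((pvP kv).filter (fun p => oMem pr p)).length)).sum := by
      calc ((l.filter (fun kv => cur.contains kv.1 && pvSurvb cur kv)).map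
            (fun kv => ((pvP kv).filter (fun p => oMem (some cur) p)).length)).sum
          ≤ ((l.filter (fun kv => cur.contains kv.1 && pvSurvb cur kv)).map
            (fun kv => ((pvP kv).filter (fun p => oMem pr p)).length)).sum :=
            List.sum_le_sum (fun kv hm => hpoint kv (List.mem_of_mem_filter hm))
        _ ≤ ((l.filter (fun kv => cur.contains kv.1)).map
            (fun kv => ((pvP kv).filter (fun p => oMem pr p)).length)).sum :=
            (hsubl.map _).sum_le_sum (fun _ _ => Nat.zero_le _)
    omega

theorem pvBisim (l : List (Int × List (String × List Int)))
    (hk : (l.map Prod.fst).Nodup) (hin : ∀ kv ∈ l, (kv.2.map Prod.fst).Nodup) :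
    ∀ (fuel : Nat) (pr : Option (List Int)) (cur : List Int) (tr tm : Int),
    (∀ p : Int, cur.contains p = true → oMem pr p = true) →
    ((l.map Prod.fst).filter (fun n => cur.contains n) = cur) →
    (∀ kv ∈ l, cur.contains kv.1 = true → pvP kv ≠ [] →
        (pvP kv).filter (fun p => oMem pr p) ≠ []) →
    pvMeasure l pr cur < fuel →
    aLoop fuel (pvBuild l pr cur) tr tm =
      (let r := bLoop fuel (pvPm l) pr cur tr tm
       ((l.filter (fun kv => r.1.contains kv.1)).map (trimEntry r.1), r.2.1, r.2.2)) := by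
  intro fuel
  induction fuel with
  | zero => intro pr cur tr tm _ _ _ h; omega
  | succ f ihf =>
    intro pr cur tr tm hsub f1 halive hmu
    have hex : (pvBuild l pr cur).map Prod.fst = cur := by rw [pvKeys_build, f1]
    have hcrux := pvScan_crux pr cur hsub l hin halive
    simp only [aLoop, bLoop]
    rw [hex, hcrux]
    rw [pvNxt_eq l cur hk f1, pvModFilter_eq l pr cur hk]
    have hchar : ∀ kv ∈ l,
        (((l.filter (fun kv => cur.contains kv.1 && pvDieb cur kv)).map Prod.fst)).contains kv.1
          = (cur.contains kv.1 && pvDieb cur kv) :=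
      fun kv hm => pvMapFst_contains l hk _ kv hm
    have hsplit := pvSplitLen l cur
    have hclen := pvCurLen l cur f1
    by_cases hdone : (l.filter (fun kv => cur.contains kv.1 && pvDieb cur kv)) = [] ∧
        (l.filter (fun kv => cur.contains kv.1 && pvSurvb cur kv && pvShrinkb pr cur kv)) = []
    · -- both loops stop this round
      have hA : ((l.filter (fun kv => cur.contains kv.1 && pvDieb cur kv)).map Prod.fst) = []
          ∧ ((l.filter (fun kv =>
              cur.contains kv.1 && pvSurvb cur kv && pvShrinkb pr cur kv)).length : Int) = 0 := by
        rw [hdone.1, hdone.2]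
        exact ⟨rfl, rfl⟩
      have hB : ((cur.length : Int)
            - (((l.filter (fun kv => cur.contains kv.1 && pvSurvb cur kv)).map Prod.fst).length : Int) = 0)
          ∧ ((((l.filter (fun kv =>
              cur.contains kv.1 && pvSurvb cur kv && pvShrinkb pr cur kv)).map Prod.fst).length : Int) = 0) := by
        rw [hdone.2]
        constructor
        · rw [List.length_map]
          have : (l.filter (fun kv => cur.contains kv.1 && pvDieb cur kv)).length = 0 := by
            rw [hdone.1]; rfl
          omega
        · rfl
      rw [if_pos hA, if_pos hB]
      have hall : ∀ kv ∈ l.filter (fun kv => cur.contains kv.1), pvSurvb cur kv = true := by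
        intro kv hm
        have hml : kv ∈ l := List.mem_of_mem_filter hm
        have hc : cur.contains kv.1 = true := by
          have := (List.mem_filter.mp hm).2
          simpa using this
        cases hs : pvSurvb cur kv with
        | true => rfl
        | false =>
          exfalso
          have hd : pvDieb cur kv = true := by rw [pvDieNotSurv, hs]; rfl
          have : kv ∈ l.filter (fun kv => cur.contains kv.1 && pvDieb cur kv) :=
            List.mem_filter.mpr ⟨hml, by rw [hc, hd]; rfl⟩
          rw [hdone.1] at this
          exact absurd this (List.not_mem_nil)
      refine congrArg₂ Prod.mk ?_ rfl
      apply List.map_congr_left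
      intro kv hm
      rw [if_pos (hall kv hm)]
    · -- both loops continue
      have hA : ¬ (((l.filter (fun kv => cur.contains kv.1 && pvDieb cur kv)).map Prod.fst) = []
          ∧ ((l.filter (fun kv =>
              cur.contains kv.1 && pvSurvb cur kv && pvShrinkb pr cur kv)).length : Int) = 0) := by
        intro ⟨e1, e2⟩
        apply hdone
        constructor
        · exact List.map_eq_nil_iff.mp e1
        · have : (l.filter (fun kv =>
              cur.contains kv.1 && pvSurvb cur kv && pvShrinkb pr cur kv)).length = 0 := by omega
          exact List.length_eq_zero_iff.mp this
      have hB : ¬ (((cur.length : Int)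
            - (((l.filter (fun kv => cur.contains kv.1 && pvSurvb cur kv)).map Prod.fst).length : Int) = 0)
          ∧ ((((l.filter (fun kv =>
              cur.contains kv.1 && pvSurvb cur kv && pvShrinkb pr cur kv)).map Prod.fst).length : Int) = 0)) := by
        intro ⟨e1, e2⟩
        apply hdone
        rw [List.length_map] at e1 e2
        constructor
        · have : (l.filter (fun kv => cur.contains kv.1 && pvDieb cur kv)).length = 0 := by omega
          exact List.length_eq_zero_iff.mp this
        · exact List.length_eq_zero_iff.mp (by omega)
      rw [if_neg hA, if_neg hB]
      rw [pvPopAux pr cur _ l hchar]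
      have hbn : pvBuild l (some cur)
          ((l.filter (fun kv => cur.contains kv.1 && pvSurvb cur kv)).map Prod.fst)
          = (l.filter (fun kv => cur.contains kv.1 && pvSurvb cur kv)).map (trimEntry cur) := by
        unfold pvBuild
        rw [pvTrimO_some]
        congr 1
        exact List.filter_congr (fun kv hm => pvMapFst_contains l hk _ kv hm)
      rw [← hbn]
      have hcnt1 : (((l.filter (fun kv => cur.contains kv.1 && pvDieb cur kv)).map Prod.fst).length : Int)
          = (cur.length : Int)
            - (((l.filter (fun kv => cur.contains kv.1 && pvSurvb cur kv)).map Prod.fst).length : Int) := by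
        rw [List.length_map, List.length_map]
        omega
      have hcnt2 : ((l.filter (fun kv =>
            cur.contains kv.1 && pvSurvb cur kv && pvShrinkb pr cur kv)).length : Int)
          = (((l.filter (fun kv =>
            cur.contains kv.1 && pvSurvb cur kv && pvShrinkb pr cur kv)).map Prod.fst).length : Int) := by
        rw [List.length_map]
      rw [hcnt1, hcnt2]
      -- the new state satisfies the invariant
      have hsub' : ∀ p : Int,
          (((l.filter (fun kv => cur.contains kv.1 && pvSurvb cur kv)).map Prod.fst)).contains p = true →
          oMem (some cur) p = true := by
        intro p hp
        have hmem : p ∈ (l.filter (fun kv => cur.contains kv.1 && pvSurvb cur kv)).map Prod.fst := by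
          simpa using hp
        obtain ⟨kv, hkv, rfl⟩ := List.mem_map.mp hmem
        have hflags := List.of_mem_filter hkv
        show cur.contains kv.1 = true
        exact (Bool.and_eq_true_iff.mp hflags).1
      have f1' : (l.map Prod.fst).filter (fun n =>
            (((l.filter (fun kv => cur.contains kv.1 && pvSurvb cur kv)).map Prod.fst)).contains n)
          = ((l.filter (fun kv => cur.contains kv.1 && pvSurvb cur kv)).map Prod.fst) := by
        rw [List.filter_map]
        congr 1
        exact List.filter_congr (fun kv hm => pvMapFst_contains l hk _ kv hm)
      have halive' : ∀ kv ∈ l,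
          (((l.filter (fun kv => cur.contains kv.1 && pvSurvb cur kv)).map Prod.fst)).contains kv.1 = true →
          pvP kv ≠ [] → (pvP kv).filter (fun p => oMem (some cur) p) ≠ [] := by
        intro kv hm hnxt hP
        rw [pvMapFst_contains l hk _ kv hm] at hnxt
        have hs : pvSurvb cur kv = true := (Bool.and_eq_true_iff.mp hnxt).2
        unfold pvSurvb at hs
        have hbeq : (pvP kv == []) = false := by
          cases h : pvP kv == [] with
          | false => rfl
          | true => exact absurd (eq_of_beq h) hP
        rw [hbeq] at hs
        have hany : ((pvP kv).any fun p => cur.contains p) = true := by simpa using hs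
        obtain ⟨p, hp, hpc⟩ := List.any_eq_true.mp hany
        have : p ∈ (pvP kv).filter (fun p => oMem (some cur) p) :=
          List.mem_filter.mpr ⟨hp, hpc⟩
        exact List.ne_nil_of_mem this
      have hdec := pvMeasDec l pr cur hk hsub hdone
      exact ihf (some cur) _ _ _ hsub' f1' halive' (by omega)

theorem pvFinal (items : List (Int × List (String × List Int)))
    (hk : (items.map Prod.fst).Nodup)
    (hin : ∀ kv ∈ items, (kv.2.map Prod.fst).Nodup) :
    iterative_parents_cleanup items = iterative_parents_cleanup_alt items := by
  have hmemkeys : ∀ kv ∈ items, ((items.map Prod.fst).contains kv.1) = true := by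
    intro kv hm
    have : kv.1 ∈ items.map Prod.fst := List.mem_map_of_mem hm
    simpa using this
  have hbuild0 : pvBuild items none (items.map Prod.fst) = items := by
    unfold pvBuild
    rw [List.filter_eq_self.mpr hmemkeys]
    exact (List.map_congr_left (fun kv _ => rfl)).trans (List.map_id _)
  have hf1 : (items.map Prod.fst).filter (fun n => (items.map Prod.fst).contains n)
      = items.map Prod.fst := by
    apply List.filter_eq_self.mpr
    intro n hn
    simpa using hn
  have hfilterP : ∀ L : List Int, L.filter (fun p => oMem none p) = L :=
    fun L => List.filter_eq_self.mpr (fun _ _ => rfl)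
  have hmu : pvMeasure items none (items.map Prod.fst) < aFuel items := by
    unfold pvMeasure aFuel
    rw [List.filter_eq_self.mpr hmemkeys]
    have hsum : (items.map (fun kv => ((pvP kv).filter (fun p => oMem none p)).length)).sum
        = (items.map (fun kv => (pyGetParents kv.2).length)).sum := by
      congr 1
      apply List.map_congr_left
      intro kv _
      rw [hfilterP]
      rfl
    rw [hsum]
    omega
  have hb := pvBisim items hk hin (aFuel items) none (items.map Prod.fst) 0 0
    (fun p _ => rfl) hf1
    (fun kv _ _ hP => by rw [hfilterP]; exact hP) hmu
  rw [hbuild0] at hb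
  exact hb

-- ===== VERDICT (by name: the statement is the Claim_ definition above) =====
theorem iterative_parents_cleanup_spec : Claim_equal_iterative_parents_cleanup := by
  intro items _ hpre
  unfold Spec_iterative_parents_cleanup
  exact pvFinal items hpre.1 hpre.2
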